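-- pv_equiv track=rewrite | github.com/ALittleMoron/PythonSketches | labs/fundamentals of applied cryptography/lab 2/RSA.py | get_blocks_from_text
-- ===== SOURCE A (Python) =====
-- from typing import Tuple, List
--
-- DEFAULT_BLOCK_SIZE = 128
--
-- BYTE_SIZE = 256
--
-- def get_blocks_from_text(
--         message: str,
--         block_size: int = DEFAULT_BLOCK_SIZE) -> List[int]:
--     message_bytes = message.encode("ascii")
--
--     block_ints = []
--     for block_start in range(0, len(message_bytes), block_size):
--         block_int = 0
--         for i in range(block_start, min(block_start + block_size, len(message_bytes))):
--             block_int += message_bytes[i] * (BYTE_SIZE ** (i % block_size))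
--         block_ints.append(block_int)
--     return block_ints
-- ===== SOURCE B (Python) =====
-- DEFAULT_BLOCK_SIZE = 128
--
-- BYTE_SIZE = 256
--
-- def get_blocks_from_text(message, block_size=DEFAULT_BLOCK_SIZE):
--     data = message.encode("ascii")
--     if block_size <= 0:
--         return []
--     blocks = []
--     while data:
--         chunk, data = data[:block_size], data[block_size:]
--         value = 0
--         for byte in reversed(chunk):
--             value = value * BYTE_SIZE + byte
--         blocks.append(value)
--     return blocks
-- ===== Notes on version B (the rewrite author's own statement) =====
-- stated objective: alternative
-- what changed: A's index loop over range(block_start, ...) summing byte*256**(i % block_size) is replaced by a while-loop that slices the byte string into chunks (data[:k], data[k:]) and folds each chunk with Horner from the high end (value = value*256 + byte), so no index arithmetic, modulus or explicit big power is ever computed.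
import Mathlib
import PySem

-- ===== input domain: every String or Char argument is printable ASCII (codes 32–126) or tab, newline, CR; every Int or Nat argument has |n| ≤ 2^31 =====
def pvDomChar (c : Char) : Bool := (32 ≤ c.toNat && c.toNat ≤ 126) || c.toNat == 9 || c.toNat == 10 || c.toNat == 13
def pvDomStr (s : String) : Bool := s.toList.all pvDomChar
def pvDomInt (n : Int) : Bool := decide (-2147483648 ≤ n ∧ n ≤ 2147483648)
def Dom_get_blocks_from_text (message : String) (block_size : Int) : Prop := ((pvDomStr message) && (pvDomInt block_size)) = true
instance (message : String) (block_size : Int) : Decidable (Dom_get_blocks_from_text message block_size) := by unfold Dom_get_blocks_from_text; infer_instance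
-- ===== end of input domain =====

-- B replaces A's index loop with powers 256**(i % block_size) by a while-loop that slices
-- off one chunk at a time and folds it with Horner from the high end (alternative decomposition).


-- ===== PORT A =====
-- message.encode("ascii"): on the ASCII domain each byte is the character's code.
def get_blocks_from_text (message : String) (block_size : Int) : List Int :=
  let message_bytes : List Int := message.toList.map (fun c => (c.toNat : Int))
  (PySem.List.pyRange 0 (message_bytes.length : Int) block_size).foldl
    (fun block_ints block_start =>
      let block_int : Int :=
        (PySem.List.pyRange block_start
            (min (block_start + block_size) (message_bytes.length : Int)) 1).foldl
          (fun acc i =>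
            acc + PySem.List.pyGetD message_bytes i 0 *
              (256 : Int) ^ (PySem.Int.mod i block_size).toNat)
          0
      block_ints ++ [block_int]) []

-- ===== PORT B =====
-- 'for byte in reversed(chunk): value = value*256 + byte'
def pvBlockValue (chunk : List Int) : Int :=
  chunk.reverse.foldl (fun value byte => value * 256 + byte) 0

-- the 'while data:' loop; k = block_size.toNat ≥ 1 at every call (the k = 0 arm of the
-- guard is only a totality guard).  data[:k] / data[k:] are take/drop for this k ≥ 1.
def pvChunkLoop (k : Nat) (data blocks : List Int) : List Int :=
  if data = [] ∨ k = 0 then blocks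
  else pvChunkLoop k (data.drop k) (blocks ++ [pvBlockValue (data.take k)])
termination_by data.length
decreasing_by
  rename_i h
  push_neg at h
  have : 0 < data.length := List.length_pos_iff.mpr h.1
  simp only [List.length_drop]
  omega

def get_blocks_from_text_alt (message : String) (block_size : Int) : List Int :=
  let data : List Int := message.toList.map (fun c => (c.toNat : Int))
  if block_size ≤ 0 then []
  else pvChunkLoop block_size.toNat data []

-- ===== PRECONDITION & SPEC =====
-- Pre_ excludes only block_size = 0, where Python's range(0, len, 0) raises ValueError.
def Pre_get_blocks_from_text (message : String) (block_size : Int) : Prop := block_size ≠ 0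
instance (message : String) (block_size : Int) : Decidable (Pre_get_blocks_from_text message block_size) := by unfold Pre_get_blocks_from_text; infer_instance
def pvWitness_get_blocks_from_text : String × Int := ("hi", 1)

def Spec_get_blocks_from_text (message : String) (block_size : Int) (out : List Int) : Prop := out = get_blocks_from_text_alt message block_size
instance (message : String) (block_size : Int) (out : List Int) : Decidable (Spec_get_blocks_from_text message block_size out) := by unfold Spec_get_blocks_from_text; infer_instance

-- ===== CLAIM (what is proved, stated in full; the proofs are below) =====
def Claim_equal_get_blocks_from_text : Prop := ∀ (message : String) (block_size : Int), Dom_get_blocks_from_text message block_size → Pre_get_blocks_from_text message block_size → Spec_get_blocks_from_text message block_size (get_blocks_from_text message block_size)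

-- ===== LEMMAS AND PROOFS =====

-- little-endian value of a byte list (both sides' per-block value)
def pvValLE : List Int → Int
  | [] => 0
  | b :: t => b + 256 * pvValLE t

theorem pvHornerB (c : List Int) : pvBlockValue c = pvValLE c := by
  unfold pvBlockValue
  rw [List.foldl_reverse]
  induction c with
  | nil => rfl
  | cons b t ih => simp [pvValLE, ih]; ring

theorem pvRangeFold (c : List Int) : ∀ (acc : Int) (w : Nat),
    (List.range c.length).foldl (fun a k => a + c.getD k 0 * (256 : Int) ^ (k + w)) acc
      = acc + 256 ^ w * pvValLE c := by
  induction c with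
  | nil => intro acc w; simp [pvValLE]
  | cons b t ih =>
    intro acc w
    simp only [List.length_cons, List.range_succ_eq_map, List.foldl_cons, List.foldl_map]
    simp only [List.getD_cons_succ, List.getD_cons_zero]
    rw [show (fun (a : Int) (k : Nat) => a + t.getD k 0 * (256:Int) ^ (k + 1 + w))
        = (fun (a : Int) (k : Nat) => a + t.getD k 0 * (256:Int) ^ (k + (w + 1))) by
      funext a k; ring_nf]
    rw [ih]
    simp [pvValLE]
    ring

theorem pvRangeFold0 (c : List Int) (acc : Int) :
    (List.range c.length).foldl (fun a k => a + c.getD k 0 * (256 : Int) ^ k) acc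
      = acc + pvValLE c := by
  have h := pvRangeFold c acc 0
  simpa using h

-- positive-step range peels its first element
theorem pvRangeConsPos {k : Int} (hk : 0 < k) (a b : Int) (hab : a < b) :
    PySem.List.pyRange a b k = a :: PySem.List.pyRange (a + k) b k := by
  rw [PySem.List.pyRange_of_pos a b hk, PySem.List.pyRange_of_pos (a + k) b hk]
  rw [if_pos hab]
  by_cases h : a + k < b
  · rw [if_pos h]
    have hq : (b - a + k - 1) / k = (b - (a + k) + k - 1) / k + 1 := by
      have harg : b - a + k - 1 = (b - (a + k) + k - 1) + 1 * k := by ring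
      rw [harg, Int.add_mul_ediv_right _ _ (by omega)]
    have hnn : 0 ≤ (b - (a + k) + k - 1) / k := Int.ediv_nonneg (by omega) (by omega)
    have hN : ((b - a + k - 1) / k).toNat = ((b - (a + k) + k - 1) / k).toNat + 1 := by
      rw [hq]; omega
    rw [hN, List.range_succ_eq_map]
    simp only [List.map_cons, List.map_map]
    congr 1
    · simp
    · apply List.map_congr_left
      intro j _
      simp only [Function.comp]
      push_cast
      ring
  · rw [if_neg h]
    have h1 : (b - a + k - 1) / k = 1 := by
      rw [← PySem.Int.floordiv_eq_ediv_of_pos hk, PySem.Int.floordiv_eq_iff_of_pos hk]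
      omega
    have ht : ((b - a + k - 1) / k).toNat = 1 := by rw [h1]; rfl
    rw [ht]
    simp

-- shifting a positive-step range by one step
theorem pvRangeShift {k : Int} (hk : 0 < k) (n : Int) :
    PySem.List.pyRange k n k = (PySem.List.pyRange 0 (n - k) k).map (fun s => s + k) := by
  rw [PySem.List.pyRange_of_pos k n hk, PySem.List.pyRange_of_pos 0 (n - k) hk]
  rw [List.map_map]
  have hcond : k < n ↔ 0 < n - k := by omega
  simp only [hcond, sub_zero]
  apply List.map_congr_left
  intro j _
  simp only [Function.comp_apply]
  ring

-- the accumulator of pvChunkLoop is a prefix (strong induction on the data length)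
theorem pvChunkLoopAcc (k : Nat) : ∀ (n : Nat) (data blocks : List Int), data.length ≤ n →
    pvChunkLoop k data blocks = blocks ++ pvChunkLoop k data [] := by
  intro n
  induction n with
  | zero =>
    intro data blocks h
    have hnil : data = [] := List.eq_nil_of_length_eq_zero (by omega)
    rw [pvChunkLoop, if_pos (Or.inl hnil), pvChunkLoop, if_pos (Or.inl hnil), List.append_nil]
  | succ n ih =>
    intro data blocks h
    by_cases hc : data = [] ∨ k = 0
    · rw [pvChunkLoop, if_pos hc, pvChunkLoop, if_pos hc, List.append_nil]
    · rw [pvChunkLoop, if_neg hc]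
      conv_rhs => rw [pvChunkLoop, if_neg hc]
      push_neg at hc
      have hpos : 0 < data.length := List.length_pos_iff.mpr hc.1
      have hd : (data.drop k).length ≤ n := by
        simp only [List.length_drop]; omega
      rw [ih _ _ hd, ih _ ([] ++ [pvBlockValue (data.take k)]) hd]
      simp

-- the chunk map over a positive-step range IS pvChunkLoop (strong induction on length)
theorem pvMapRangeChunksAux {k : Int} (hk : 0 < k) : ∀ (n : Nat) (data : List Int),
    data.length ≤ n →
    (PySem.List.pyRange 0 (data.length : Int) k).map
      (fun s => pvValLE ((data.drop s.toNat).take k.toNat)) = pvChunkLoop k.toNat data [] := by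
  intro n
  induction n with
  | zero =>
    intro data h
    have hnil : data = [] := List.eq_nil_of_length_eq_zero (by omega)
    subst hnil
    rw [pvChunkLoop, if_pos (Or.inl rfl)]
    rw [show (([] : List Int).length : Int) = 0 by simp]
    rw [PySem.List.pyRange_of_pos 0 0 hk, if_neg (by omega)]
    simp
  | succ n ih =>
    intro data h
    by_cases hnil : data = []
    · subst hnil
      rw [pvChunkLoop, if_pos (Or.inl rfl)]
      rw [show (([] : List Int).length : Int) = 0 by simp]
      rw [PySem.List.pyRange_of_pos 0 0 hk, if_neg (by omega)]
      simp
    · have hlen : 0 < data.length := List.length_pos_iff.mpr hnil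
      rw [pvChunkLoop, if_neg (by push_neg; exact ⟨hnil, by omega⟩)]
      rw [pvChunkLoopAcc k.toNat (data.drop k.toNat).length _ _ le_rfl]
      rw [pvRangeConsPos hk 0 _ (by exact_mod_cast hlen)]
      rw [List.map_cons]
      have hd : (data.drop k.toNat).length ≤ n := by
        simp only [List.length_drop]; omega
      congr 1
      · simp [pvHornerB]
      · rw [zero_add, pvRangeShift hk, List.map_map, ← ih _ hd]
        by_cases hkn : k.toNat ≤ data.length
        · have hlen' : ((data.drop k.toNat).length : Int) = (data.length : Int) - k := by
            simp only [List.length_drop]; omega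
          rw [hlen']
          apply List.map_congr_left
          intro s hs
          rw [PySem.List.mem_pyRange_iff_of_pos hk] at hs
          obtain ⟨hs0, -, -⟩ := hs
          simp only [Function.comp]
          congr 2
          rw [List.drop_drop]
          congr 1
          omega
        · -- k exceeds the data: one chunk only; both remaining ranges are empty
          push_neg at hkn
          have h1 : PySem.List.pyRange 0 ((data.length : Int) - k) k = [] := by
            rw [PySem.List.pyRange_of_pos _ _ hk, if_neg (by omega)]; simp
          have h2 : PySem.List.pyRange 0 ((data.drop k.toNat).length : Int) k = [] := by
            rw [PySem.List.pyRange_of_pos _ _ hk,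
              if_neg (by simp only [List.length_drop]; omega)]
            simp
          rw [h1, h2]
          simp

theorem pvMapRangeChunks {k : Int} (hk : 0 < k) (data : List Int) :
    (PySem.List.pyRange 0 (data.length : Int) k).map
      (fun s => pvValLE ((data.drop s.toNat).take k.toNat)) = pvChunkLoop k.toNat data [] :=
  pvMapRangeChunksAux hk data.length data le_rfl

theorem pv_main : ∀ (message : String) (block_size : Int), block_size ≠ 0 →
    get_blocks_from_text message block_size = get_blocks_from_text_alt message block_size := by
  intro message block_size hpre
  unfold get_blocks_from_text get_blocks_from_text_alt
  dsimp only
  set bytes : List Int := message.toList.map (fun c => (c.toNat : Int)) with hbytes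
  set n : Nat := bytes.length with hn
  rcases lt_trichotomy block_size 0 with hneg | hz | hpos
  · -- negative step: the outer range is empty; B's guard returns []
    rw [PySem.List.pyRange_of_neg 0 (n : Int) hneg]
    have h' : ¬ ((n : Int) < 0) := by omega
    rw [if_pos (by omega : block_size ≤ 0)]
    simp [h']
  · exact absurd hz hpre
  · -- positive block size
    rw [if_neg (by omega : ¬ block_size ≤ 0)]
    -- A's per-block inner loop computes pvValLE of the chunk
    rw [PySem.List.foldl_congr_mem _ _
        (fun (block_ints : List Int) (s : Int) =>
          block_ints ++ [pvValLE ((bytes.drop s.toNat).take block_size.toNat)]) [] ?_]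
    · rw [PySem.List.foldl_append_singleton_eq_map, List.nil_append]
      exact pvMapRangeChunks hpos bytes
    · intro acc s hs
      rw [(PySem.List.mem_pyRange_iff_of_pos hpos s)] at hs
      obtain ⟨hs0, hsn, hdvd⟩ := hs
      simp only [sub_zero] at hdvd
      congr 2
      -- per-block equality
      set e : Int := min (s + block_size) (n : Int) with he
      have hse : s ≤ e := by omega
      have h0e : 0 ≤ e := by omega
      set c : List Int := (bytes.drop s.toNat).take block_size.toNat with hc
      have hclen : c.length = e.toNat - s.toNat := by
        rw [hc]; simp [List.length_drop]; omega
      -- A's inner loop over indices → fold over List.range c.length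
      rw [PySem.List.pyRange_one s e, List.foldl_map]
      have hlen' : (e - s).toNat = c.length := by omega
      rw [hlen']
      rw [PySem.List.foldl_congr_mem _ _
          (fun (a : Int) (k : Nat) => a + c.getD k 0 * (256 : Int) ^ k) 0 ?_]
      · rw [pvRangeFold0, zero_add]
      · intro a k hk
        rw [List.mem_range] at hk
        have hkc : k < c.length := hk
        congr 1
        have hsk : s + (k : Int) = ((s.toNat + k : Nat) : Int) := by omega
        congr 1
        · -- bytes[s+k] = c[k]
          rw [hsk, PySem.List.pyGetD_natCast]
          have hlt : s.toNat + k < n := by omega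
          rw [List.getD_eq_getElem bytes 0 (by omega), List.getD_eq_getElem c 0 hkc]
          simp [hc]
        · -- exponent: (s+k) mod block_size = k
          have hkbs : (k : Int) < block_size := by omega
          have hm : PySem.Int.mod (s + (k : Int)) block_size = (k : Int) := by
            rw [PySem.Int.mod_eq_emod_of_pos hpos]
            obtain ⟨q, hq⟩ := hdvd
            rw [hq, add_comm, Int.add_mul_emod_self_left]
            exact Int.emod_eq_of_lt (by omega) hkbs
          rw [hm]
          simp

-- ===== VERDICT (by name: the statement is the Claim_ definition above) =====
theorem get_blocks_from_text_spec : Claim_equal_get_blocks_from_text := by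
  intro message block_size _hdom hpre
  exact pv_main message block_size hpre
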